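-- pv_equiv track=rewrite | github.com/Tilt-A-Whirl/rebuilder | rebuilderutils.py | buildAlgorithmList
-- ===== SOURCE A (Python) =====
-- import itertools
--
-- def buildAlgorithmList(opts):
--     """
--     Builds list of algorithms
--     """
--     algs = []
--     for i in range(1, len(opts)+1):
--         for subset in itertools.combinations(opts, i):
--             st = ''
--             for char in subset:
--                 st = st + char
--             algs.append(st)
--
--     return algs
-- ===== SOURCE B (Python) =====
-- def buildAlgorithmList(opts):
--     # Recursive index-chooser instead of itertools.combinations: for each size k,
--     # build every size-k subset string by picking the first element's index and
--     # recursing on the remaining suffix, which reproduces itertools' order.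
--     def combos(items, k):
--         if k == 0:
--             return ['']
--         return [items[j] + rest
--                 for j in range(len(items) - k + 1)
--                 for rest in combos(items[j + 1:], k - 1)]
--     return [s for k in range(1, len(opts) + 1) for s in combos(opts, k)]
-- ===== Notes on version B (the rewrite author's own statement) =====
-- stated objective: alternative
-- what changed: Replaces the itertools.combinations library call with a recursive generator that builds each size-k subset string by choosing the first element's index and recursing on the remaining suffix, preserving itertools' index-lexicographic order.
import Mathlib
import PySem

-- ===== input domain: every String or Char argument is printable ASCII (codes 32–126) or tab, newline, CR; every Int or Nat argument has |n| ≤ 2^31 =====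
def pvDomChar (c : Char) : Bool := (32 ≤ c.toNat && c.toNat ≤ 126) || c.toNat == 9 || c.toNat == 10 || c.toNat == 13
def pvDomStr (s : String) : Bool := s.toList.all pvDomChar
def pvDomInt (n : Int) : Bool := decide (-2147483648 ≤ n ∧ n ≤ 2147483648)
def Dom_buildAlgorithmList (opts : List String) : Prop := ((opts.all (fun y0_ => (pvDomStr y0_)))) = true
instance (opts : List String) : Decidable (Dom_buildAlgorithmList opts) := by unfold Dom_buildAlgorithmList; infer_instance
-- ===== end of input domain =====

-- B replaces itertools.combinations with a recursive index-chooser that builds each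
-- size-k subset string directly (same order, same output); objective: alternative decomposition.

-- ===== PORT A =====
def buildAlgorithmList (opts : List String) : List String :=
  -- for i in range(1, len(opts)+1): for subset in combinations(opts, i): st = ''; st = st + char; algs.append(st)
  (PySem.List.pyRange 1 ((opts.length : Int) + 1) 1).foldl
    (fun algs i =>
      (PySem.List.combinations opts i.toNat).foldl
        (fun algs subset => algs ++ [subset.foldl (fun st c => st ++ c) ""]) algs)
    []

-- ===== PORT B =====
-- combos(items, k) from Source B; items[j] is pyGetD (j is always in range), items[j+1:] is slice
def pvCombos : Nat → List String → List String
  | 0, _ => [""]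
  | (k+1), items =>
      (PySem.List.pyRange 0 ((items.length : Int) - (k : Int)) 1).flatMap
        (fun j =>
          (pvCombos k (PySem.List.slice items (some (j + 1)) none)).map
            (fun rest => PySem.List.pyGetD items j "" ++ rest))

def buildAlgorithmList_alt (opts : List String) : List String :=
  (PySem.List.pyRange 1 ((opts.length : Int) + 1) 1).flatMap
    (fun k => pvCombos k.toNat opts)

-- ===== PRECONDITION & SPEC =====
def Spec_buildAlgorithmList (opts : List String) (out : List String) : Prop := out = buildAlgorithmList_alt opts
instance (opts : List String) (out : List String) : Decidable (Spec_buildAlgorithmList opts out) := by unfold Spec_buildAlgorithmList; infer_instance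

-- ===== CLAIM (what is proved, stated in full; the proofs are below) =====
def Claim_equal_buildAlgorithmList : Prop := ∀ (opts : List String), Dom_buildAlgorithmList opts → Spec_buildAlgorithmList opts (buildAlgorithmList opts)

-- ===== LEMMAS AND PROOFS =====

-- the inner 'st = st + char' loop of A
def pvConcat (s : List String) : String := s.foldl (fun st c => st ++ c) ""

theorem pvFoldl_str (s : List String) (init : String) :
    s.foldl (fun st c => st ++ c) init = init ++ pvConcat s := by
  induction s generalizing init with
  | nil => simp [pvConcat]
  | cons a s ih =>
    have h1 : pvConcat (a :: s) = a ++ pvConcat s := by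
      show List.foldl (fun st c => st ++ c) "" (a :: s) = a ++ pvConcat s
      rw [List.foldl_cons, ih ("" ++ a)]; simp
    rw [List.foldl_cons, ih (init ++ a), h1, String.append_assoc]

@[simp] theorem pvConcat_nil : pvConcat [] = "" := rfl

@[simp] theorem pvConcat_cons (x : String) (s : List String) :
    pvConcat (x :: s) = x ++ pvConcat s := by
  show List.foldl (fun st c => st ++ c) "" (x :: s) = x ++ pvConcat s
  rw [List.foldl_cons, pvFoldl_str]; simp

-- combinations of size k+1, grouped by the index of the first chosen element
theorem pvComb_flat (k : Nat) (items : List String) :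
    (PySem.List.combinations items (k+1)).map pvConcat
      = (List.range (items.length - k)).flatMap
          (fun j => ((PySem.List.combinations (items.drop (j+1)) k).map pvConcat).map
              (fun r => items.getD j "" ++ r)) := by
  induction items with
  | nil => simp [PySem.List.combinations_nil_succ]
  | cons x xs ih =>
    rw [PySem.List.combinations_cons_succ, List.map_append]
    by_cases h : k ≤ xs.length
    · have hlen : (x :: xs).length - k = (xs.length - k) + 1 := by simp; omega
      rw [hlen, List.range_succ_eq_map, List.flatMap_cons, List.flatMap_map, ih]
      simp [List.map_map, Function.comp]
    · have h1 : xs.length < k := by omega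
      have h2 : xs.length < k + 1 := by omega
      have hlen : (x :: xs).length - k = 0 := by simp; omega
      rw [PySem.List.combinations_eq_nil_of_length_lt xs h1,
          PySem.List.combinations_eq_nil_of_length_lt xs h2, hlen]
      simp

theorem pvCombos_eq (k : Nat) : ∀ items : List String,
    pvCombos k items = (PySem.List.combinations items k).map pvConcat := by
  induction k with
  | zero => intro items; simp [pvCombos, PySem.List.combinations_zero]
  | succ k ih =>
    intro items
    rw [pvCombos, PySem.List.pyRange_one, pvComb_flat,
        show ((((items.length : Int) - (k : Int)) - 0).toNat) = items.length - k from by omega,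
        List.flatMap_map]
    congr 1
    funext j
    simp only [zero_add]
    rw [show ((j : Int) + 1) = (((j + 1 : Nat)) : Int) from by push_cast; ring,
        PySem.List.slice_from_natCast, ih]
    simp

theorem buildAlgorithmList_eq_flatMap (opts : List String) :
    buildAlgorithmList opts
      = (PySem.List.pyRange 1 ((opts.length : Int) + 1) 1).flatMap
          (fun i => (PySem.List.combinations opts i.toNat).map pvConcat) := by
  unfold buildAlgorithmList
  have hfun : (fun (algs : List String) (i : Int) =>
      (PySem.List.combinations opts i.toNat).foldl
        (fun algs subset => algs ++ [subset.foldl (fun st c => st ++ c) ""]) algs)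
      = fun algs i => algs ++ (PySem.List.combinations opts i.toNat).map pvConcat := by
    funext algs i
    exact PySem.List.foldl_append_singleton_eq_map (f := pvConcat) _ _
  rw [hfun, PySem.List.foldl_append_eq_flatMap]
  simp

-- ===== VERDICT (by name: the statement is the Claim_ definition above) =====
theorem buildAlgorithmList_spec : Claim_equal_buildAlgorithmList := by
  intro opts _
  unfold Spec_buildAlgorithmList buildAlgorithmList_alt
  rw [buildAlgorithmList_eq_flatMap]
  simp [pvCombos_eq]
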